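-- pv_equiv track=rewrite | github.com/Chandini2223/my-codes | 3578-count-partitions-with-max-min-difference-at-most-k/3578-count-partitions-with-max-min-difference-at-most-k.py | countPartitions
-- ===== SOURCE A (Python) =====
-- from collections import deque
--
-- def countPartitions(nums, k):
--     """
--     :type nums: List[int]
--     :type k: int
--     :rtype: int
--     """
--     MOD = 10**9 + 7
--     n = len(nums)
--     # r_exclusive[i] = smallest index e (> i or ==i) such that segment nums[i:e] is maximal valid (e is exclusive)
--     r_exclusive = [0] * n
--
--     maxdq = deque()   # store indices, front = index of current max
--     mindq = deque()   # store indices, front = index of current min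
--     r = 0
--
--     # two-pointer to compute r_exclusive for every l
--     for l in range(n):
--         # expand r while the segment [l..r] (inclusive) remains valid
--         while r < n:
--             x = nums[r]
--             # update max deque
--             while maxdq and nums[maxdq[-1]] <= x:
--                 maxdq.pop()
--             maxdq.append(r)
--             # update min deque
--             while mindq and nums[mindq[-1]] >= x:
--                 mindq.pop()
--             mindq.append(r)
--
--             # if invalid, undo adding r and stop expanding
--             if nums[maxdq[0]] - nums[mindq[0]] > k:
--                 if maxdq and maxdq[-1] == r:
--                     maxdq.pop()
--                 if mindq and mindq[-1] == r:
--                     mindq.pop()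
--                 break
--             r += 1
--
--         # now r is exclusive end for start l
--         r_exclusive[l] = r
--
--         # move left pointer forward: if l was at front of any deque, pop it
--         if maxdq and maxdq[0] == l:
--             maxdq.popleft()
--         if mindq and mindq[0] == l:
--             mindq.popleft()
--
--     # dp[i] = number of ways to partition suffix starting at i
--     # dp[n] = 1 (empty suffix)
--     dp = [0] * (n + 1)
--     dp[n] = 1
--     # prefix[i] = sum of dp[i]..dp[n]  (prefix from i to end)
--     prefix = [0] * (n + 2)
--     prefix[n] = dp[n]  # =1
--     prefix[n+1] = 0
--
--     # compute dp from right to left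
--     for i in range(n - 1, -1, -1):
--         e = r_exclusive[i]            # exclusive end index
--         # dp[i] = sum_{t = i+1 .. e} dp[t] = prefix[i+1] - prefix[e+1]
--         dp_val = (prefix[i+1] - prefix[e+1]) % MOD
--         dp[i] = dp_val
--         prefix[i] = (dp[i] + prefix[i+1]) % MOD
--
--     return dp[0]
-- ===== SOURCE B (Python) =====
-- from collections import deque
--
-- def countPartitions(nums, k):
--     """Forward sliding-window DP: dp[j] = number of valid partitions of nums[:j],
--     window left boundary lo advanced with monotonic index deques, prefix sums of dp."""
--     MOD = 10**9 + 7
--     n = len(nums)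
--     dp = [0] * (n + 1)
--     dp[0] = 1
--     prefix = [0] * (n + 2)   # prefix[j+1] = sum of dp[0..j] mod MOD
--     prefix[1] = 1
--     maxq = deque()
--     minq = deque()
--     lo = 0
--     for j in range(1, n + 1):
--         x = nums[j - 1]
--         while maxq and nums[maxq[-1]] <= x:
--             maxq.pop()
--         maxq.append(j - 1)
--         while minq and nums[minq[-1]] >= x:
--             minq.pop()
--         minq.append(j - 1)
--         # shrink window [lo, j-1] until it is valid (or empty, when k < 0)
--         while lo < j and nums[maxq[0]] - nums[minq[0]] > k:
--             if maxq[0] == lo: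
--                 maxq.popleft()
--             if minq[0] == lo:
--                 minq.popleft()
--             lo += 1
--         dp[j] = (prefix[j] - prefix[lo]) % MOD
--         prefix[j + 1] = (dp[j] + prefix[j]) % MOD
--     return dp[n]
-- ===== Notes on version B (the rewrite author's own statement) =====
-- stated objective: alternative
-- what changed: Replaces A's precomputed r_exclusive array (two-pointer with push-undo deque surgery) followed by a backward suffix DP with one combined forward pass: dp over prefixes with a sliding left boundary lo per right end j, deque fronts evicted as lo advances, and dp[j] read off a running prefix-sum array.
import Mathlib
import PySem

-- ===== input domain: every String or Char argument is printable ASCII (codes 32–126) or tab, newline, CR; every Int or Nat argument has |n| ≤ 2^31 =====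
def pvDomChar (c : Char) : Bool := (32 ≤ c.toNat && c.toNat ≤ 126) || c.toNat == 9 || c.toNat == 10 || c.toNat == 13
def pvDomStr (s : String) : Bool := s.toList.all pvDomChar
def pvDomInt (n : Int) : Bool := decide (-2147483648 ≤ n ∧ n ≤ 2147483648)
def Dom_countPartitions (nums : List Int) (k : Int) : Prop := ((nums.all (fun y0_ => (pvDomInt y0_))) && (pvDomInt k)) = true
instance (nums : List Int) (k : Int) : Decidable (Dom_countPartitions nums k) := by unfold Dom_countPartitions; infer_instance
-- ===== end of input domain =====

-- B replaces A's precomputed r_exclusive array (two-pointer with push-undo deque surgery)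
-- plus backward suffix DP by a single forward pass: dp over prefixes with a sliding left
-- boundary per right end (objective: alternative; equivalence of the return values is proved below).

-- ===== PORT A =====
-- pop from the deque's back while nums[back] <= x (A's while-pop, run on the reversed list)
def aPopMax (nums : List Int) (x : Int) (dq : List Nat) : List Nat :=
  ((dq.reverse).dropWhile (fun i => decide (nums.getD i 0 ≤ x))).reverse

def aPopMin (nums : List Int) (x : Int) (dq : List Nat) : List Nat :=
  ((dq.reverse).dropWhile (fun i => decide (nums.getD i 0 ≥ x))).reverse

-- A's inner 'while r < n: … expand r, break when invalid'
def aWhile (nums : List Int) (k : Int) (n r : Nat) (maxdq mindq : List Nat) :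
    Nat × List Nat × List Nat :=
  if h : r < n then
    let x := nums.getD r 0
    let m1 := aPopMax nums x maxdq ++ [r]
    let m2 := aPopMin nums x mindq ++ [r]
    if nums.getD (m1.headD 0) 0 - nums.getD (m2.headD 0) 0 > k then
      (r, (if m1.getLast? = some r then m1.dropLast else m1),
          (if m2.getLast? = some r then m2.dropLast else m2))
    else
      aWhile nums k n (r+1) m1 m2
  else (r, maxdq, mindq)
  termination_by n - r
  decreasing_by omega

-- A's outer 'for l in range(n)'; r_exclusive entries accumulated in order
def aOuter (nums : List Int) (k : Int) (n l r : Nat) (maxdq mindq : List Nat)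
    (rex : List Nat) : List Nat :=
  if _h : l < n then
    let t := aWhile nums k n r maxdq mindq
    let m1' := if t.2.1.head? = some l then t.2.1.tail else t.2.1
    let m2' := if t.2.2.head? = some l then t.2.2.tail else t.2.2
    aOuter nums k n (l+1) t.1 m1' m2' (rex ++ [t.1])
  else rex
  termination_by n - l

-- A's 'for i in range(n-1, -1, -1)' backward dp with the prefix array
def aDpLoop (rex : List Nat) : Nat → List Int → List Int → List Int × List Int
  | 0, dp, pre => (dp, pre)
  | i+1, dp, pre =>
    let e := rex.getD i 0
    let v := PySem.Int.mod (pre.getD (i+1) 0 - pre.getD (e+1) 0) 1000000007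
    let dp' := dp.set i v
    let pre' := pre.set i (PySem.Int.mod (v + pre.getD (i+1) 0) 1000000007)
    aDpLoop rex i dp' pre'

def countPartitions (nums : List Int) (k : Int) : Int :=
  let n := nums.length
  let rex := aOuter nums k n 0 0 [] [] []
  let dp0 := (List.replicate (n+1) (0:Int)).set n 1
  let pre0 := (List.replicate (n+2) (0:Int)).set n 1
  ((aDpLoop rex n dp0 pre0).1).getD 0 0

-- ===== PORT B =====
-- B's 'while lo < j and nums[maxq[0]] - nums[minq[0]] > k' shrink loop
def bEvict (nums : List Int) (k : Int) (j lo : Nat) (maxq minq : List Nat) :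
    Nat × List Nat × List Nat :=
  if _h : lo < j then
    if nums.getD (maxq.headD 0) 0 - nums.getD (minq.headD 0) 0 > k then
      bEvict nums k j (lo+1)
        (if maxq.head? = some lo then maxq.tail else maxq)
        (if minq.head? = some lo then minq.tail else minq)
    else (lo, maxq, minq)
  else (lo, maxq, minq)
  termination_by j - lo

-- B's single forward pass 'for j in range(1, n+1)'
def bLoop (nums : List Int) (k : Int) (n j lo : Nat) (maxq minq : List Nat)
    (dp pre : List Int) : List Int × List Int :=
  if _h : j ≤ n then
    let x := nums.getD (j-1) 0
    let m1 := ((maxq.reverse).dropWhile (fun i => decide (nums.getD i 0 ≤ x))).reverse ++ [j-1]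
    let m2 := ((minq.reverse).dropWhile (fun i => decide (nums.getD i 0 ≥ x))).reverse ++ [j-1]
    let t := bEvict nums k j lo m1 m2
    let v := PySem.Int.mod (pre.getD j 0 - pre.getD t.1 0) 1000000007
    let dp' := dp.set j v
    let pre' := pre.set (j+1) (PySem.Int.mod (v + pre.getD j 0) 1000000007)
    bLoop nums k n (j+1) t.1 t.2.1 t.2.2 dp' pre'
  else (dp, pre)
  termination_by n + 1 - j

def countPartitions_alt (nums : List Int) (k : Int) : Int :=
  let n := nums.length
  let dp0 := (List.replicate (n+1) (0:Int)).set 0 1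
  let pre0 := (List.replicate (n+2) (0:Int)).set 1 1
  ((bLoop nums k n 1 0 [] [] dp0 pre0).1).getD n 0

-- ===== PRECONDITION & SPEC =====
def Spec_countPartitions (nums : List Int) (k : Int) (out : Int) : Prop := out = countPartitions_alt nums k
instance (nums : List Int) (k : Int) (out : Int) : Decidable (Spec_countPartitions nums k out) := by unfold Spec_countPartitions; infer_instance

-- ===== CLAIM (what is proved, stated in full; the proofs are below) =====
def Claim_equal_countPartitions : Prop := ∀ (nums : List Int) (k : Int), Dom_countPartitions nums k → Spec_countPartitions nums k (countPartitions nums k)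

-- ===== LEMMAS AND PROOFS =====

-- value at a Nat index (all indices the ports touch are in range)
def pvG (nums : List Int) (i : Nat) : Int := nums.getD i 0

-- the index window [l, r)
def pvWin (l r : Nat) : List Nat := List.range' l (r - l)

-- i survives in a monotonic deque for window ending (exclusively) at r
def pvKeep (f : Nat → Int) (r i : Nat) : Bool := (pvWin (i+1) r).all (fun j => decide (f j < f i))

-- the exact content of the monotonic deque for window [l, r)
def pvFilt (f : Nat → Int) (l r : Nat) : List Nat := (pvWin l r).filter (pvKeep f r)

-- segment nums[l:r] is valid (max - min ≤ k), stated pairwise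
def pvOk (nums : List Int) (k : Int) (l r : Nat) : Bool :=
  (pvWin l r).all (fun i => (pvWin l r).all (fun j => decide (pvG nums i - pvG nums j ≤ k)))

-- generic back-pop
def pvPop (f : Nat → Int) (x : Int) (dq : List Nat) : List Nat :=
  ((dq.reverse).dropWhile (fun i => decide (f i ≤ x))).reverse

-- deque invariant of A between iterations: a sub-filter of the exact deque that
-- retains every index whose value beats the value at r
def pvInv (f : Nat → Int) (l r : Nat) (dq : List Nat) : Prop :=
  ∃ q : Nat → Bool, dq = (pvFilt f l r).filter q ∧ ∀ i, f r < f i → q i = true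

-- e is the maximal valid exclusive end for start l
def pvIsE (nums : List Int) (k : Int) (n l e : Nat) : Prop :=
  l ≤ e ∧ e ≤ n ∧ pvOk nums k l e = true ∧ (e = n ∨ pvOk nums k l (e+1) = false)

-- number of ways to cut nums[a:b] into valid segments (first-segment recursion)
def pvT (nums : List Int) (k : Int) (a b : Nat) : ℕ :=
  if h : a < b then
    ∑ t ∈ (Finset.Ioc a b).attach,
      (if pvOk nums k a t.1 = true then pvT nums k t.1 b else 0)
  else 1
  termination_by b - a
  decreasing_by have := Finset.mem_Ioc.mp t.2; omega

-- suffix sums Σ_{m ∈ [t, n]} pvT m n (A's prefix array), prefix sums Σ_{m < t} pvT 0 m (B's)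
def pvS (nums : List Int) (k : Int) (n t : Nat) : ℕ := ∑ m ∈ Finset.Icc t n, pvT nums k m n
def pvPS (nums : List Int) (k : Int) (t : Nat) : ℕ := ∑ m ∈ Finset.range t, pvT nums k 0 m

-- ---- basic window lemmas ----
theorem mem_pvWin {l r i : Nat} : i ∈ pvWin l r ↔ l ≤ i ∧ i < r := by
  unfold pvWin; rw [List.mem_range'_1]; omega

theorem pvWin_nil {l r : Nat} (h : r ≤ l) : pvWin l r = [] := by
  unfold pvWin; have : r - l = 0 := by omega
  rw [this]; rfl

theorem pvWin_succ_right {l r : Nat} (h : l ≤ r) : pvWin l (r+1) = pvWin l r ++ [r] := by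
  unfold pvWin
  have h1 : r + 1 - l = (r - l) + 1 := by omega
  have h2 : l + (r - l) = r := by omega
  rw [h1, List.range'_1_concat, h2]

theorem pvWin_cons {l r : Nat} (h : l < r) : pvWin l r = l :: pvWin (l+1) r := by
  unfold pvWin
  have h1 : r - l = (r - (l+1)) + 1 := by omega
  rw [h1, List.range'_succ]

theorem pvOk_iff {nums k l r} : pvOk nums k l r = true ↔
    ∀ i j, l ≤ i → i < r → l ≤ j → j < r → nums.getD i 0 - nums.getD j 0 ≤ k := by
  unfold pvOk pvG
  simp only [List.all_eq_true, decide_eq_true_eq, mem_pvWin]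
  constructor
  · intro h i j hi hi' hj hj'; exact h i ⟨hi, hi'⟩ j ⟨hj, hj'⟩
  · intro h i hi j hj; exact h i j hi.1 hi.2 hj.1 hj.2

theorem pvOk_mono {nums k} {l l' r r' : Nat} (hl : l ≤ l') (hr : r' ≤ r)
    (h : pvOk nums k l r = true) : pvOk nums k l' r' = true := by
  rw [pvOk_iff] at h ⊢
  intro i j hi hi' hj hj'
  exact h i j (by omega) (by omega) (by omega) (by omega)

theorem pvOk_nil {nums k} {l r : Nat} (h : r ≤ l) : pvOk nums k l r = true := by
  rw [pvOk_iff]; intro i j hi hi'; omega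

theorem pvOk_small {nums k} (hk : 0 ≤ k) {l r : Nat} (h : r ≤ l + 1) :
    pvOk nums k l r = true := by
  rw [pvOk_iff]; intro i j hi hi' hj hj'
  have : i = j := by omega
  subst this; simpa using hk

theorem pvOk_false_mono {nums k} {l l' r r' : Nat} (hl : l' ≤ l) (hr : r ≤ r')
    (h : pvOk nums k l r = false) : pvOk nums k l' r' = false := by
  by_contra hne
  have : pvOk nums k l' r' = true := by
    cases hb : pvOk nums k l' r' with
    | true => rfl
    | false => exact absurd hb hne
  have := pvOk_mono hl hr this
  rw [h] at this; exact Bool.noConfusion this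

-- ---- deque filter lemmas ----
theorem mem_pvFilt {f l r i} : i ∈ pvFilt f l r ↔ (l ≤ i ∧ i < r) ∧ pvKeep f r i = true := by
  unfold pvFilt
  rw [List.mem_filter, mem_pvWin]

theorem pvFilt_pairwise (f : Nat → Int) (l r : Nat) :
    (pvFilt f l r).Pairwise (fun a b => f b < f a) := by
  have hlt : (pvFilt f l r).Pairwise (· < ·) :=
    List.Pairwise.sublist List.filter_sublist (List.pairwise_lt_range' 1)
  refine hlt.imp_of_mem ?_
  intro a b ha hb hab
  have ha' := mem_pvFilt.mp ha
  have hb' := mem_pvFilt.mp hb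
  have hk := ha'.2
  unfold pvKeep at hk
  rw [List.all_eq_true] at hk
  have := hk b (mem_pvWin.mpr ⟨by omega, hb'.1.2⟩)
  exact of_decide_eq_true this

theorem pvPop_eq_filter (f : Nat → Int) (x : Int) (dq : List Nat)
    (h : dq.Pairwise (fun a b => f b < f a)) :
    pvPop f x dq = dq.filter (fun i => decide (x < f i)) := by
  induction dq using List.reverseRecOn with
  | nil => rfl
  | append_singleton ds a ih =>
    have hpw : ds.Pairwise (fun a b => f b < f a) :=
      List.Pairwise.sublist (by simp) h
    unfold pvPop at ih ⊢
    rw [List.reverse_append, List.reverse_singleton, List.singleton_append,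
      List.dropWhile_cons]
    by_cases hfa : f a ≤ x
    · rw [if_pos (by simpa using hfa)]
      rw [ih hpw, List.filter_append]
      have : List.filter (fun i => decide (x < f i)) [a] = [] := by
        simp [decide_eq_false_iff_not]; omega
      rw [this, List.append_nil]
    · rw [if_neg (by simpa using hfa)]
      rw [List.reverse_cons, List.reverse_reverse]
      have hall : ∀ b ∈ ds ++ [a], decide (x < f b) = true := by
        intro b hb
        rcases List.mem_append.mp hb with hb | hb
        · have := (List.pairwise_append.mp h).2.2 b hb a (by simp)
          simp only [decide_eq_true_eq]
          omega
        · simp only [List.mem_singleton] at hb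
          subst hb
          simp only [decide_eq_true_eq]
          omega
      rw [List.filter_eq_self.mpr hall]

theorem pvFilt_succ (f : Nat → Int) {l r : Nat} (h : l ≤ r) :
    pvFilt f l (r+1) = (pvFilt f l r).filter (fun i => decide (f r < f i)) ++ [r] := by
  unfold pvFilt
  rw [pvWin_succ_right h, List.filter_append, List.filter_filter]
  congr 1
  · apply List.filter_congr
    intro i hi
    have hi' := mem_pvWin.mp hi
    unfold pvKeep
    rw [pvWin_succ_right (by omega), List.all_append]
    simp only [List.all_cons, List.all_nil, Bool.and_true]
    rw [Bool.and_comm]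
  · simp only [List.filter_cons, List.filter_nil]
    have : pvKeep f (r+1) r = true := by
      unfold pvKeep
      rw [pvWin_nil (Nat.le_refl (r+1))]
      rfl
    rw [if_pos this]

theorem pvFilt_popleft (f : Nat → Int) (q : Nat → Bool) (l r : Nat) :
    (if ((pvFilt f l r).filter q).head? = some l then ((pvFilt f l r).filter q).tail
     else (pvFilt f l r).filter q) = (pvFilt f (l+1) r).filter q := by
  have hne : ((pvFilt f (l+1) r).filter q).head? ≠ some l := by
    intro hh
    have hmem : l ∈ (pvFilt f (l+1) r).filter q := by
      cases hD : (pvFilt f (l+1) r).filter q with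
      | nil => rw [hD] at hh; exact absurd hh (by simp)
      | cons a t =>
        rw [hD] at hh
        simp only [List.head?_cons, Option.some.injEq] at hh
        rw [hh]
        exact List.mem_cons_self
    have := (mem_pvFilt.mp (List.mem_of_mem_filter hmem)).1.1
    omega
  by_cases hlr : l < r
  · unfold pvFilt
    rw [pvWin_cons hlr, List.filter_cons]
    by_cases hkeep : pvKeep f r l = true
    · rw [if_pos hkeep, List.filter_cons]
      by_cases hq : q l = true
      · rw [if_pos hq]
        simp
      · rw [if_neg hq]
        exact if_neg hne
    · rw [if_neg hkeep]
      exact if_neg hne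
  · unfold pvFilt
    rw [pvWin_nil (by omega), pvWin_nil (by omega)]
    simp

-- every window element is dominated by some deque element to its right
theorem pvFilt_dom (f : Nat → Int) {l r : Nat} :
    ∀ d i, l ≤ i → i < r → r - i ≤ d → ∃ m, m ∈ pvFilt f l r ∧ f i ≤ f m := by
  intro d
  induction d with
  | zero => intro i h1 h2 h3; omega
  | succ d ih =>
    intro i h1 h2 h3
    by_cases hk : pvKeep f r i = true
    · exact ⟨i, mem_pvFilt.mpr ⟨⟨h1, h2⟩, hk⟩, le_refl _⟩
    · have : ∃ j ∈ pvWin (i+1) r, ¬ (f j < f i) := by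
        by_contra hc
        push_neg at hc
        apply hk
        unfold pvKeep
        rw [List.all_eq_true]
        intro j hj
        exact decide_eq_true (hc j hj)
      obtain ⟨j, hj, hfj⟩ := this
      have hj' := mem_pvWin.mp hj
      obtain ⟨m, hm, hfm⟩ := ih j (by omega) hj'.2 (by omega)
      exact ⟨m, hm, by omega⟩

theorem pvFilt_head (f : Nat → Int) {l r : Nat} (h : l < r) :
    ∃ m, (pvFilt f l r).head? = some m ∧ (l ≤ m ∧ m < r) ∧
      ∀ i, l ≤ i → i < r → f i ≤ f m := by
  obtain ⟨m0, hm0, _⟩ := pvFilt_dom f (r - l) l (le_refl l) h (by omega)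
  cases hD : pvFilt f l r with
  | nil => rw [hD] at hm0; exact absurd hm0 (by simp)
  | cons h0 tl =>
    refine ⟨h0, rfl, ?_, ?_⟩
    · have : h0 ∈ pvFilt f l r := by rw [hD]; exact List.mem_cons_self
      exact (mem_pvFilt.mp this).1
    · intro i hi hi'
      obtain ⟨m, hm, hfm⟩ := pvFilt_dom f (r - i) i hi hi' (by omega)
      have hpw := pvFilt_pairwise f l r
      rw [hD] at hpw hm
      rcases List.mem_cons.mp hm with hm | hm
      · subst hm; exact hfm
      · have := (List.pairwise_cons.mp hpw).1 m hm
        omega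

-- push step from the invariant: popping then appending r yields the exact deque of [l, r+1)
theorem pvInv_push (f : Nat → Int) {l r : Nat} {dq : List Nat} (hlr : l ≤ r)
    (hinv : pvInv f l r dq) :
    pvPop f (f r) dq ++ [r] = pvFilt f l (r+1) := by
  obtain ⟨q, hdq, hq⟩ := hinv
  have hpw : dq.Pairwise (fun a b => f b < f a) := by
    rw [hdq]
    exact List.Pairwise.sublist List.filter_sublist (pvFilt_pairwise f l r)
  rw [pvPop_eq_filter f (f r) dq hpw, hdq, List.filter_filter, pvFilt_succ f hlr]
  congr 1
  apply List.filter_congr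
  intro i _
  by_cases hfi : f r < f i
  · rw [hq i hfi]
    simp [hfi]
  · simp [hfi]

-- the two fronts decide validity of the (nonempty) window
theorem pvSpread {nums k} {l r : Nat} (h : l < r) :
    ((nums.getD ((pvFilt (pvG nums) l r).headD 0) 0 -
      nums.getD ((pvFilt (fun i => -pvG nums i) l r).headD 0) 0 > k) ↔
      pvOk nums k l r = false) := by
  obtain ⟨m, hm?, hmb, hmax⟩ := pvFilt_head (pvG nums) h
  obtain ⟨m', hm'?, hmb', hmin⟩ := pvFilt_head (fun i => -pvG nums i) h
  rw [List.headD_eq_head?_getD, hm?, List.headD_eq_head?_getD, hm'?]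
  simp only [Option.getD_some]
  have hfalse : pvOk nums k l r = false ↔ ¬ (pvOk nums k l r = true) := by
    cases pvOk nums k l r <;> simp
  rw [hfalse, pvOk_iff]
  constructor
  · intro hgt hall
    have := hall m m' hmb.1 hmb.2 hmb'.1 hmb'.2
    unfold pvG at this
    omega
  · intro hnall
    push_neg at hnall
    obtain ⟨i, j, hi, hi', hj, hj', hij⟩ := hnall
    have h1 := hmax i hi hi'
    have h2 := hmin j hj hj'
    unfold pvG at h1 h2
    omega

-- the min-deque pop is the generic pop for the negated values
theorem aPopMin_eq (nums : List Int) (x : Int) (dq : List Nat) :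
    aPopMin nums x dq = pvPop (fun i => -pvG nums i) (-x) dq := by
  unfold aPopMin pvPop pvG
  have : (fun i => decide (nums.getD i 0 ≥ x)) = (fun i => decide (-nums.getD i 0 ≤ -x)) := by
    funext i
    rw [decide_eq_decide]
    omega
  rw [this]

theorem aPopMax_eq (nums : List Int) (x : Int) (dq : List Nat) :
    aPopMax nums x dq = pvPop (pvG nums) x dq := rfl

-- ---- A: the inner while loop computes the maximal valid end ----
theorem aWhile_spec (nums : List Int) (k : Int) (n : Nat) :
    ∀ r maxdq mindq l, l ≤ r → r ≤ n → pvOk nums k l r = true →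
    pvInv (pvG nums) l r maxdq → pvInv (fun i => -pvG nums i) l r mindq →
    pvIsE nums k n l (aWhile nums k n r maxdq mindq).1 ∧
    r ≤ (aWhile nums k n r maxdq mindq).1 ∧
    pvInv (pvG nums) l (aWhile nums k n r maxdq mindq).1 (aWhile nums k n r maxdq mindq).2.1 ∧
    pvInv (fun i => -pvG nums i) l (aWhile nums k n r maxdq mindq).1 (aWhile nums k n r maxdq mindq).2.2 := by
  suffices H : ∀ fuel r maxdq mindq l, n - r ≤ fuel → l ≤ r → r ≤ n → pvOk nums k l r = true →
      pvInv (pvG nums) l r maxdq → pvInv (fun i => -pvG nums i) l r mindq →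
      pvIsE nums k n l (aWhile nums k n r maxdq mindq).1 ∧
      r ≤ (aWhile nums k n r maxdq mindq).1 ∧
      pvInv (pvG nums) l (aWhile nums k n r maxdq mindq).1 (aWhile nums k n r maxdq mindq).2.1 ∧
      pvInv (fun i => -pvG nums i) l (aWhile nums k n r maxdq mindq).1 (aWhile nums k n r maxdq mindq).2.2 by
    intro r maxdq mindq l h1 h2 h3 h4 h5
    exact H (n - r) r maxdq mindq l (Nat.le_refl _) h1 h2 h3 h4 h5
  intro fuel
  induction fuel with
  | zero =>
    intro r maxdq mindq l hfu hlr hrn hok h1 h2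
    have hrn' : r = n := by omega
    rw [aWhile.eq_def, dif_neg (by omega)]
    exact ⟨⟨hlr, by omega, hok, Or.inl hrn'⟩, Nat.le_refl _, h1, h2⟩
  | succ fuel ih =>
    intro r maxdq mindq l hfu hlr hrn hok h1 h2
    by_cases hr : r < n
    · have hm1 : aPopMax nums (nums.getD r 0) maxdq ++ [r] = pvFilt (pvG nums) l (r+1) := by
        rw [aPopMax_eq]
        exact pvInv_push (pvG nums) hlr h1
      have hm2 : aPopMin nums (nums.getD r 0) mindq ++ [r] = pvFilt (fun i => -pvG nums i) l (r+1) := by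
        rw [aPopMin_eq]
        exact pvInv_push (fun i => -pvG nums i) hlr h2
      have hlast1 : (pvFilt (pvG nums) l (r+1)).getLast? = some r := by
        rw [pvFilt_succ (pvG nums) hlr]
        exact List.getLast?_concat
      have hlast2 : (pvFilt (fun i => -pvG nums i) l (r+1)).getLast? = some r := by
        rw [pvFilt_succ (fun i => -pvG nums i) hlr]
        exact List.getLast?_concat
      have hdl1 : (pvFilt (pvG nums) l (r+1)).dropLast =
          (pvFilt (pvG nums) l r).filter (fun i => decide (pvG nums r < pvG nums i)) := by
        rw [pvFilt_succ (pvG nums) hlr]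
        exact List.dropLast_concat
      have hdl2 : (pvFilt (fun i => -pvG nums i) l (r+1)).dropLast =
          (pvFilt (fun i => -pvG nums i) l r).filter
            (fun i => decide (-pvG nums r < -pvG nums i)) := by
        rw [pvFilt_succ (fun i => -pvG nums i) hlr]
        exact List.dropLast_concat
      have hcond : (nums.getD ((pvFilt (pvG nums) l (r+1)).headD 0) 0 -
          nums.getD ((pvFilt (fun i => -pvG nums i) l (r+1)).headD 0) 0 > k) ↔
          pvOk nums k l (r+1) = false := pvSpread (by omega)
      have hunf : aWhile nums k n r maxdq mindq =
          if nums.getD ((pvFilt (pvG nums) l (r+1)).headD 0) 0 -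
             nums.getD ((pvFilt (fun i => -pvG nums i) l (r+1)).headD 0) 0 > k then
            (r, (pvFilt (pvG nums) l r).filter (fun i => decide (pvG nums r < pvG nums i)),
                (pvFilt (fun i => -pvG nums i) l r).filter (fun i => decide (-pvG nums r < -pvG nums i)))
          else aWhile nums k n (r+1) (pvFilt (pvG nums) l (r+1)) (pvFilt (fun i => -pvG nums i) l (r+1)) := by
        rw [aWhile.eq_def, dif_pos hr]
        simp only [hm1, hm2, hlast1, hlast2, hdl1, hdl2, eq_self_iff_true, if_true]
      by_cases hvalid : pvOk nums k l (r+1) = true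
      · have hc' : ¬ (nums.getD ((pvFilt (pvG nums) l (r+1)).headD 0) 0 -
            nums.getD ((pvFilt (fun i => -pvG nums i) l (r+1)).headD 0) 0 > k) := by
          rw [hcond, hvalid]
          simp
        rw [hunf, if_neg hc']
        obtain ⟨ha, hb, hc, hd⟩ := ih (r+1) (pvFilt (pvG nums) l (r+1))
          (pvFilt (fun i => -pvG nums i) l (r+1)) l (by omega) (by omega) (by omega) hvalid
          ⟨fun _ => true, (List.filter_true _).symm, fun _ _ => rfl⟩
          ⟨fun _ => true, (List.filter_true _).symm, fun _ _ => rfl⟩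
        exact ⟨ha, by omega, hc, hd⟩
      · have hfalse : pvOk nums k l (r+1) = false := by
          cases hx : pvOk nums k l (r+1) with
          | true => exact absurd hx hvalid
          | false => rfl
        rw [hunf, if_pos (hcond.mpr hfalse)]
        refine ⟨⟨hlr, by omega, hok, Or.inr hfalse⟩, Nat.le_refl _, ?_, ?_⟩
        · exact ⟨fun i => decide (pvG nums r < pvG nums i), rfl, fun i hi => decide_eq_true hi⟩
        · exact ⟨fun i => decide (-pvG nums r < -pvG nums i), rfl, fun i hi => decide_eq_true hi⟩
    · have hrn' : r = n := by omega
      rw [aWhile.eq_def, dif_neg hr]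
      exact ⟨⟨hlr, by omega, hok, Or.inl hrn'⟩, Nat.le_refl _, h1, h2⟩

-- ---- A: the outer loop fills r_exclusive with the maximal valid ends (k ≥ 0) ----
theorem aOuter_spec (nums : List Int) (k : Int) (hk : 0 ≤ k) (n : Nat) :
    ∀ l r maxdq mindq rex, l ≤ n → l ≤ r → r ≤ n → pvOk nums k l r = true →
    pvInv (pvG nums) l r maxdq → pvInv (fun i => -pvG nums i) l r mindq →
    rex.length = l → (∀ m, m < l → pvIsE nums k n m (rex.getD m 0)) →
    (aOuter nums k n l r maxdq mindq rex).length = n ∧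
    ∀ m, m < n → pvIsE nums k n m ((aOuter nums k n l r maxdq mindq rex).getD m 0) := by
  suffices H : ∀ fuel l r maxdq mindq rex, n - l ≤ fuel → l ≤ n → l ≤ r → r ≤ n →
      pvOk nums k l r = true →
      pvInv (pvG nums) l r maxdq → pvInv (fun i => -pvG nums i) l r mindq →
      rex.length = l → (∀ m, m < l → pvIsE nums k n m (rex.getD m 0)) →
      (aOuter nums k n l r maxdq mindq rex).length = n ∧
      ∀ m, m < n → pvIsE nums k n m ((aOuter nums k n l r maxdq mindq rex).getD m 0) by
    intro l r maxdq mindq rex h1 h2 h3 h4 h5 h6 h7 h8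
    exact H (n - l) l r maxdq mindq rex (Nat.le_refl _) h1 h2 h3 h4 h5 h6 h7 h8
  intro fuel
  induction fuel with
  | zero =>
    intro l r maxdq mindq rex hfu hln hlr hrn hok h1 h2 hlen hprev
    have hl : l = n := by omega
    rw [aOuter.eq_def, dif_neg (by omega)]
    exact ⟨by omega, fun m hm => hprev m (by omega)⟩
  | succ fuel ih =>
    intro l r maxdq mindq rex hfu hln hlr hrn hok h1 h2 hlen hprev
    by_cases hl : l < n
    · obtain ⟨hisE, hrle, hi1, hi2⟩ := aWhile_spec nums k n r maxdq mindq l hlr hrn hok h1 h2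
      set t := aWhile nums k n r maxdq mindq with ht
      have hE := hisE
      obtain ⟨hle', hen', hokE, _⟩ := hE
      -- l + 1 ≤ t.1 (single elements are valid since 0 ≤ k)
      have hl1 : l + 1 ≤ t.1 := by
        by_contra hcon
        have ht1 : t.1 ≤ l := by omega
        rcases hisE.2.2.2 with hn | hf
        · omega
        · have : pvOk nums k l (t.1+1) = true := pvOk_small hk (by omega)
          rw [hf] at this
          exact Bool.noConfusion this
      -- advance the deques
      obtain ⟨q1, hq1, hq1t⟩ := hi1
      obtain ⟨q2, hq2, hq2t⟩ := hi2
      have hpop1 : (if t.2.1.head? = some l then t.2.1.tail else t.2.1) =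
          (pvFilt (pvG nums) (l+1) t.1).filter q1 := by
        rw [hq1]; exact pvFilt_popleft (pvG nums) q1 l t.1
      have hpop2 : (if t.2.2.head? = some l then t.2.2.tail else t.2.2) =
          (pvFilt (fun i => -pvG nums i) (l+1) t.1).filter q2 := by
        rw [hq2]; exact pvFilt_popleft (fun i => -pvG nums i) q2 l t.1
      rw [aOuter.eq_def, dif_pos hl]
      simp only [← ht, hpop1, hpop2]
      refine ih (l+1) t.1 _ _ (rex ++ [t.1]) (by omega) (by omega) hl1 hen'
        (pvOk_mono (by omega) (Nat.le_refl _) hokE)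
        ⟨q1, rfl, hq1t⟩ ⟨q2, rfl, hq2t⟩ (by simp [hlen]) ?_
      intro m hm
      rcases Nat.lt_or_ge m l with hml | hml
      · have : (rex ++ [t.1]).getD m 0 = rex.getD m 0 := by
          rw [List.getD_eq_getElem?_getD, List.getD_eq_getElem?_getD,
            List.getElem?_append_left (by omega)]
        rw [this]
        exact hprev m hml
      · have hm' : m = l := by omega
        subst hm'
        have : (rex ++ [t.1]).getD m 0 = t.1 := by
          rw [List.getD_eq_getElem?_getD, ← hlen, List.getElem?_concat_length]
          rfl
        rw [this]
        exact hisE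
    · have hl' : l = n := by omega
      rw [aOuter.eq_def, dif_neg (by omega)]
      exact ⟨by omega, fun m hm => hprev m (by omega)⟩

-- ---- the count: forward and backward recurrences ----
theorem pvT_fwd (nums k) {a b : Nat} (h : a < b) :
    pvT nums k a b = ∑ t ∈ Finset.Ioc a b, (if pvOk nums k a t = true then pvT nums k t b else 0) := by
  rw [pvT, dif_pos h]
  exact Finset.sum_attach (Finset.Ioc a b) (fun y => if pvOk nums k a y = true then pvT nums k y b else 0)

theorem pvT_stop (nums k) {a b : Nat} (h : b ≤ a) : pvT nums k a b = 1 := by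
  rw [pvT, dif_neg (by omega)]

theorem pvT_back (nums k) {a b : Nat} (h : a < b) :
    pvT nums k a b = ∑ i ∈ Finset.Ico a b, (if pvOk nums k i b = true then pvT nums k a i else 0) := by
  suffices H : ∀ d a b, b - a ≤ d → a < b →
      pvT nums k a b = ∑ i ∈ Finset.Ico a b, (if pvOk nums k i b = true then pvT nums k a i else 0) from
    H (b - a) a b (Nat.le_refl _) h
  intro d
  induction d with
  | zero => intro a b h1 h2; omega
  | succ d ih =>
    intro a b hle hab
    rw [pvT_fwd nums k hab]
    rw [← Finset.Ioo_insert_right hab, Finset.sum_insert (by simp)]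
    rw [pvT_stop nums k (Nat.le_refl b)]
    have step1 : ∀ t ∈ Finset.Ioo a b,
        (if pvOk nums k a t = true then pvT nums k t b else 0) =
        ∑ i ∈ Finset.Ico t b, (if pvOk nums k a t = true then
          (if pvOk nums k i b = true then pvT nums k t i else 0) else 0) := by
      intro t ht
      have ht' := Finset.mem_Ioo.mp ht
      by_cases hok : pvOk nums k a t = true
      · simp only [if_pos hok]
        exact ih t b (by omega) ht'.2
      · simp [if_neg hok]
    rw [Finset.sum_congr rfl step1]
    have swap : ∑ t ∈ Finset.Ioo a b, ∑ i ∈ Finset.Ico t b,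
        (if pvOk nums k a t = true then (if pvOk nums k i b = true then pvT nums k t i else 0) else 0) =
        ∑ i ∈ Finset.Ioo a b, ∑ t ∈ Finset.Ico (a+1) (i+1),
        (if pvOk nums k a t = true then (if pvOk nums k i b = true then pvT nums k t i else 0) else 0) := by
      rw [show Finset.Ioo a b = Finset.Ico (a+1) b from by ext x; simp]
      exact Finset.sum_Ico_Ico_comm (a+1) b _
    rw [swap]
    have inner : ∀ i ∈ Finset.Ioo a b,
        (∑ t ∈ Finset.Ico (a+1) (i+1),
          (if pvOk nums k a t = true then (if pvOk nums k i b = true then pvT nums k t i else 0) else 0)) =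
        (if pvOk nums k i b = true then pvT nums k a i else 0) := by
      intro i hi
      have hi' := Finset.mem_Ioo.mp hi
      by_cases hokb : pvOk nums k i b = true
      · simp only [if_pos hokb]
        rw [pvT_fwd nums k hi'.1]
        rw [show Finset.Ico (a+1) (i+1) = Finset.Ioc a i from by ext x; simp]
      · simp [if_neg hokb]
    rw [Finset.sum_congr rfl inner]
    rw [show Finset.Ico a b = insert a (Finset.Ioo a b) from (Finset.Ioo_insert_left hab).symm,
      Finset.sum_insert (by simp)]
    congr 1
    rw [pvT_stop nums k (Nat.le_refl a)]

-- ---- A: the dp loop ----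
theorem aDpLoop_spec (nums : List Int) (k : Int) (n : Nat) (rex : List Nat)
    (hrex : ∀ m, m < n → pvIsE nums k n m (rex.getD m 0)) :
    ∀ i dp pre, i ≤ n → dp.length = n+1 → pre.length = n+2 →
    (∀ t, i ≤ t → t ≤ n → dp.getD t 0 = (pvT nums k t n : Int) % 1000000007) →
    (∀ t, i ≤ t → t ≤ n+1 → pre.getD t 0 = (pvS nums k n t : Int) % 1000000007) →
    ((aDpLoop rex i dp pre).1).getD 0 0 = (pvT nums k 0 n : Int) % 1000000007 := by
  intro i
  induction i with
  | zero =>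
    intro dp pre hin hdl hpl hdp hpre
    exact hdp 0 (Nat.le_refl _) (by omega)
  | succ i ih =>
    intro dp pre hin hdl hpl hdp hpre
    have hiE := hrex i (by omega)
    obtain ⟨hie, hen, hokE, hbd⟩ := hiE
    set e := rex.getD i 0 with he
    -- the new dp value is pvT i n mod M
    have hpre1 : pre.getD (i+1) 0 = (pvS nums k n (i+1) : Int) % 1000000007 :=
      hpre (i+1) (Nat.le_refl _) (by omega)
    have hpre2 : pre.getD (e+1) 0 = (pvS nums k n (e+1) : Int) % 1000000007 :=
      hpre (e+1) (by omega) (by omega)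
    have hsplit : pvS nums k n (i+1) = (∑ m ∈ Finset.Ioc i e, pvT nums k m n) + pvS nums k n (e+1) := by
      unfold pvS
      rw [show Finset.Icc (i+1) n = Finset.Ioc i n from by ext x; simp,
          show Finset.Icc (e+1) n = Finset.Ioc e n from by ext x; simp]
      rw [Finset.sum_Ioc_consecutive _ (by omega : i ≤ e) (by omega : e ≤ n)]
    have hTi : pvT nums k i n = ∑ m ∈ Finset.Ioc i e, pvT nums k m n := by
      rw [pvT_fwd nums k (by omega : i < n)]
      rw [← Finset.sum_Ioc_consecutive _ (by omega : i ≤ e) (by omega : e ≤ n)]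
      have hz : ∑ t ∈ Finset.Ioc e n, (if pvOk nums k i t = true then pvT nums k t n else 0) = 0 := by
        apply Finset.sum_eq_zero
        intro t ht
        have ht' := Finset.mem_Ioc.mp ht
        rcases hbd with hn | hf
        · omega
        · rw [pvOk_false_mono (Nat.le_refl i) (by omega : e+1 ≤ t) hf]
          simp
      rw [hz, add_zero]
      apply Finset.sum_congr rfl
      intro t ht
      have ht' := Finset.mem_Ioc.mp ht
      rw [if_pos (pvOk_mono (Nat.le_refl i) ht'.2 hokE)]
    have hv : PySem.Int.mod (pre.getD (i+1) 0 - pre.getD (e+1) 0) 1000000007 =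
        (pvT nums k i n : Int) % 1000000007 := by
      rw [PySem.Int.mod_eq_emod_of_pos (by norm_num), hpre1, hpre2, ← Int.sub_emod,
        hsplit, hTi]
      congr 1
      push_cast
      ring
    have hSi : pvS nums k n i = pvT nums k i n + pvS nums k n (i+1) := by
      unfold pvS
      rw [show Finset.Icc (i+1) n = Finset.Ioc i n from by ext x; simp,
          show Finset.Icc i n = insert i (Finset.Ioc i n) from (Finset.Ioc_insert_left (by omega)).symm,
          Finset.sum_insert (by simp)]
    have hv2 : PySem.Int.mod (PySem.Int.mod (pre.getD (i+1) 0 - pre.getD (e+1) 0) 1000000007 +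
        pre.getD (i+1) 0) 1000000007 = (pvS nums k n i : Int) % 1000000007 := by
      rw [PySem.Int.mod_eq_emod_of_pos (by norm_num), hv, hpre1, ← Int.add_emod, hSi]
      congr 1
    simp only [aDpLoop, ← he]
    refine ih (dp.set i (PySem.Int.mod (pre.getD (i+1) 0 - pre.getD (e+1) 0) 1000000007))
      (pre.set i (PySem.Int.mod (PySem.Int.mod (pre.getD (i+1) 0 - pre.getD (e+1) 0) 1000000007 + pre.getD (i+1) 0) 1000000007))
      (by omega) (by simp [hdl]) (by simp [hpl]) ?_ ?_
    · intro t hti htn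
      rcases Nat.eq_or_lt_of_le hti with hti' | hti'
      · subst hti'
        rw [List.getD_eq_getElem?_getD, List.getElem?_set_self (by omega), Option.getD_some, hv]
      · rw [List.getD_eq_getElem?_getD, List.getElem?_set_ne (by omega), ← List.getD_eq_getElem?_getD]
        exact hdp t (by omega) htn
    · intro t hti htn
      rcases Nat.eq_or_lt_of_le hti with hti' | hti'
      · subst hti'
        rw [List.getD_eq_getElem?_getD, List.getElem?_set_self (by omega), Option.getD_some, hv2]
      · rw [List.getD_eq_getElem?_getD, List.getElem?_set_ne (by omega), ← List.getD_eq_getElem?_getD]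
        exact hpre t (by omega) htn

theorem A_eq_of_nonneg (nums : List Int) (k : Int) (hk : 0 ≤ k) :
    countPartitions nums k = (pvT nums k 0 nums.length : Int) % 1000000007 := by
  have hinv1 : pvInv (pvG nums) 0 0 [] := ⟨fun _ => true, rfl, fun _ _ => rfl⟩
  have hinv2 : pvInv (fun i => -pvG nums i) 0 0 [] := ⟨fun _ => true, rfl, fun _ _ => rfl⟩
  obtain ⟨hlen, hprops⟩ := aOuter_spec nums k hk nums.length 0 0 [] [] []
    (by omega) (by omega) (by omega) (pvOk_nil (Nat.le_refl 0)) hinv1 hinv2 rfl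
    (by intro m hm; omega)
  show ((aDpLoop (aOuter nums k nums.length 0 0 [] [] []) nums.length
      ((List.replicate (nums.length+1) (0:Int)).set nums.length 1)
      ((List.replicate (nums.length+2) (0:Int)).set nums.length 1)).1).getD 0 0 = _
  apply aDpLoop_spec nums k nums.length _ hprops nums.length _ _ (Nat.le_refl _)
    (by simp) (by simp)
  · intro t ht1 ht2
    have ht : t = nums.length := by omega
    subst ht
    rw [List.getD_eq_getElem?_getD, List.getElem?_set_self (by simp), Option.getD_some,
      pvT_stop nums k (Nat.le_refl _)]
    norm_num
  · intro t ht1 ht2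
    rcases Nat.eq_or_lt_of_le ht1 with ht | ht
    · subst ht
      rw [List.getD_eq_getElem?_getD, List.getElem?_set_self (by simp), Option.getD_some]
      have : pvS nums k nums.length nums.length = 1 := by
        unfold pvS
        rw [Finset.Icc_self, Finset.sum_singleton, pvT_stop nums k (Nat.le_refl _)]
      rw [this]
      norm_num
    · have ht' : t = nums.length + 1 := by omega
      subst ht'
      rw [List.getD_eq_getElem?_getD, List.getElem?_set_ne (by omega),
        List.getElem?_replicate_of_lt (by omega), Option.getD_some]
      have : pvS nums k nums.length (nums.length+1) = 0 := by
        unfold pvS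
        rw [Finset.Icc_eq_empty (by omega), Finset.sum_empty]
      rw [this]
      norm_num

-- ---- B: the shrink loop computes the minimal valid start ----
theorem bEvict_spec (nums : List Int) (k : Int) (j : Nat) :
    ∀ lo maxq minq, lo ≤ j →
    maxq = pvFilt (pvG nums) lo j → minq = pvFilt (fun i => -pvG nums i) lo j →
    (∀ l, l < lo → pvOk nums k l j = false) →
    lo ≤ (bEvict nums k j lo maxq minq).1 ∧ (bEvict nums k j lo maxq minq).1 ≤ j ∧
    pvOk nums k (bEvict nums k j lo maxq minq).1 j = true ∧
    (∀ l, l < (bEvict nums k j lo maxq minq).1 → pvOk nums k l j = false) ∧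
    (bEvict nums k j lo maxq minq).2.1 = pvFilt (pvG nums) (bEvict nums k j lo maxq minq).1 j ∧
    (bEvict nums k j lo maxq minq).2.2 = pvFilt (fun i => -pvG nums i) (bEvict nums k j lo maxq minq).1 j := by
  suffices H : ∀ fuel lo maxq minq, j - lo ≤ fuel → lo ≤ j →
      maxq = pvFilt (pvG nums) lo j → minq = pvFilt (fun i => -pvG nums i) lo j →
      (∀ l, l < lo → pvOk nums k l j = false) →
      lo ≤ (bEvict nums k j lo maxq minq).1 ∧ (bEvict nums k j lo maxq minq).1 ≤ j ∧
      pvOk nums k (bEvict nums k j lo maxq minq).1 j = true ∧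
      (∀ l, l < (bEvict nums k j lo maxq minq).1 → pvOk nums k l j = false) ∧
      (bEvict nums k j lo maxq minq).2.1 = pvFilt (pvG nums) (bEvict nums k j lo maxq minq).1 j ∧
      (bEvict nums k j lo maxq minq).2.2 = pvFilt (fun i => -pvG nums i) (bEvict nums k j lo maxq minq).1 j by
    intro lo maxq minq h1 h2 h3 h4
    exact H (j - lo) lo maxq minq (Nat.le_refl _) h1 h2 h3 h4
  intro fuel
  induction fuel with
  | zero =>
    intro lo maxq minq hfu hloj hm hn hbad
    have hlo' : lo = j := by omega
    rw [bEvict.eq_def, dif_neg (by omega)]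
    exact ⟨Nat.le_refl _, hloj, by rw [hlo']; exact pvOk_nil (Nat.le_refl _), hbad, hm, hn⟩
  | succ fuel ih =>
    intro lo maxq minq hfu hloj hm hn hbad
    by_cases hlo : lo < j
    · have hcond : (nums.getD (maxq.headD 0) 0 - nums.getD (minq.headD 0) 0 > k) ↔
          pvOk nums k lo j = false := by
        rw [hm, hn]
        exact pvSpread hlo
      rw [bEvict.eq_def, dif_pos hlo]
      by_cases hc : nums.getD (maxq.headD 0) 0 - nums.getD (minq.headD 0) 0 > k
      · rw [if_pos hc]
        have hfm : (if maxq.head? = some lo then maxq.tail else maxq) =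
            pvFilt (pvG nums) (lo+1) j := by
          rw [hm, ← List.filter_true (pvFilt (pvG nums) lo j),
            pvFilt_popleft (pvG nums) (fun _ => true) lo j, List.filter_true]
        have hfn : (if minq.head? = some lo then minq.tail else minq) =
            pvFilt (fun i => -pvG nums i) (lo+1) j := by
          rw [hn, ← List.filter_true (pvFilt (fun i => -pvG nums i) lo j),
            pvFilt_popleft (fun i => -pvG nums i) (fun _ => true) lo j, List.filter_true]
        rw [hfm, hfn]
        have hbad' : ∀ l, l < lo+1 → pvOk nums k l j = false := by
          intro l hl
          rcases Nat.lt_or_ge l lo with h' | h'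
          · exact hbad l h'
          · have : l = lo := by omega
            subst this
            exact hcond.mp hc
        obtain ⟨ha, hb, hcc, hd, he, hf⟩ := ih (lo+1) _ _ (by omega) (by omega) rfl rfl hbad'
        exact ⟨by omega, hb, hcc, hd, he, hf⟩
      · rw [if_neg hc]
        have hok : pvOk nums k lo j = true := by
          cases hx : pvOk nums k lo j with
          | true => rfl
          | false => exact absurd (hcond.mpr hx) hc
        exact ⟨Nat.le_refl _, by omega, hok, hbad, hm, hn⟩
    · have hlo' : lo = j := by omega
      rw [bEvict.eq_def, dif_neg (by omega)]
      exact ⟨Nat.le_refl _, hloj, by rw [hlo']; exact pvOk_nil (Nat.le_refl _), hbad, hm, hn⟩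

-- ---- B: the forward loop ----
theorem bLoop_spec (nums : List Int) (k : Int) (n : Nat) :
    ∀ j lo maxq minq dp pre, 1 ≤ j → j ≤ n+1 → lo ≤ j-1 →
    pvOk nums k lo (j-1) = true → (∀ l, l < lo → pvOk nums k l (j-1) = false) →
    maxq = pvFilt (pvG nums) lo (j-1) → minq = pvFilt (fun i => -pvG nums i) lo (j-1) →
    dp.length = n+1 → pre.length = n+2 →
    (∀ t, t ≤ j-1 → dp.getD t 0 = (pvT nums k 0 t : Int) % 1000000007) →
    (∀ t, t ≤ j → pre.getD t 0 = (pvPS nums k t : Int) % 1000000007) →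
    ((bLoop nums k n j lo maxq minq dp pre).1).getD n 0 = (pvT nums k 0 n : Int) % 1000000007 := by
  suffices H : ∀ fuel j lo maxq minq dp pre, n + 1 - j ≤ fuel → 1 ≤ j → j ≤ n+1 → lo ≤ j-1 →
      pvOk nums k lo (j-1) = true → (∀ l, l < lo → pvOk nums k l (j-1) = false) →
      maxq = pvFilt (pvG nums) lo (j-1) → minq = pvFilt (fun i => -pvG nums i) lo (j-1) →
      dp.length = n+1 → pre.length = n+2 →
      (∀ t, t ≤ j-1 → dp.getD t 0 = (pvT nums k 0 t : Int) % 1000000007) →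
      (∀ t, t ≤ j → pre.getD t 0 = (pvPS nums k t : Int) % 1000000007) →
      ((bLoop nums k n j lo maxq minq dp pre).1).getD n 0 = (pvT nums k 0 n : Int) % 1000000007 by
    intro j lo maxq minq dp pre h1 h2 h3 h4 h5 h6 h7 h8 h9 h10 h11
    exact H (n + 1 - j) j lo maxq minq dp pre (Nat.le_refl _) h1 h2 h3 h4 h5 h6 h7 h8 h9 h10 h11
  intro fuel
  induction fuel with
  | zero =>
    intro j lo maxq minq dp pre hfu hj hjn hlo hok hbad hm hn' hdl hpl hdp hpre
    rw [bLoop.eq_def, dif_neg (by omega)]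
    exact hdp n (by omega)
  | succ fuel ih =>
    intro j lo maxq minq dp pre hfu hj hjn hlo hok hbad hm hn' hdl hpl hdp hpre
    by_cases hjle : j ≤ n
    · have hj1 : j - 1 + 1 = j := by omega
      -- the pushed deques are the exact deques of window [lo, j)
      have hm1 : ((maxq.reverse).dropWhile (fun i => decide (nums.getD i 0 ≤ nums.getD (j-1) 0))).reverse ++ [j-1] =
          pvFilt (pvG nums) lo j := by
        have e1 : ((maxq.reverse).dropWhile (fun i => decide (nums.getD i 0 ≤ nums.getD (j-1) 0))).reverse =
            pvPop (pvG nums) (pvG nums (j-1)) maxq := rfl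
        rw [e1, ← hj1]
        apply pvInv_push (pvG nums) hlo
        rw [hm]
        exact ⟨fun _ => true, (List.filter_true _).symm, fun _ _ => rfl⟩
      have hm2 : ((minq.reverse).dropWhile (fun i => decide (nums.getD i 0 ≥ nums.getD (j-1) 0))).reverse ++ [j-1] =
          pvFilt (fun i => -pvG nums i) lo j := by
        have e1 : ((minq.reverse).dropWhile (fun i => decide (nums.getD i 0 ≥ nums.getD (j-1) 0))).reverse =
            aPopMin nums (nums.getD (j-1) 0) minq := rfl
        rw [e1, aPopMin_eq, ← hj1]
        apply pvInv_push (fun i => -pvG nums i) hlo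
        rw [hn']
        exact ⟨fun _ => true, (List.filter_true _).symm, fun _ _ => rfl⟩
      have hbadj : ∀ l, l < lo → pvOk nums k l j = false := by
        intro l hl
        exact pvOk_false_mono (Nat.le_refl l) (by omega) (hbad l hl)
      obtain ⟨hea, heb, hec, hed, hee, hef⟩ :=
        bEvict_spec nums k j lo (pvFilt (pvG nums) lo j) (pvFilt (fun i => -pvG nums i) lo j)
          (by omega) rfl rfl hbadj
      set t := bEvict nums k j lo (pvFilt (pvG nums) lo j) (pvFilt (fun i => -pvG nums i) lo j) with htdef
      -- the new dp entry
      have hval : PySem.Int.mod (pre.getD j 0 - pre.getD t.1 0) 1000000007 =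
          (pvT nums k 0 j : Int) % 1000000007 := by
        rw [PySem.Int.mod_eq_emod_of_pos (by norm_num), hpre j (Nat.le_refl _),
          hpre t.1 heb, ← Int.sub_emod]
        have hsplit : pvPS nums k j = pvPS nums k t.1 + ∑ m ∈ Finset.Ico t.1 j, pvT nums k 0 m := by
          unfold pvPS
          rw [Finset.range_eq_Ico]
          exact (Finset.sum_Ico_consecutive _ (by omega : 0 ≤ t.1) heb).symm
        have hT : pvT nums k 0 j = ∑ m ∈ Finset.Ico t.1 j, pvT nums k 0 m := by
          rw [pvT_back nums k (by omega : 0 < j)]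
          rw [← Finset.sum_Ico_consecutive _ (by omega : 0 ≤ t.1) heb]
          have hz : ∑ i ∈ Finset.Ico 0 t.1, (if pvOk nums k i j = true then pvT nums k 0 i else 0) = 0 := by
            apply Finset.sum_eq_zero
            intro i hi
            have hi' := Finset.mem_Ico.mp hi
            rw [hed i hi'.2]
            simp
          rw [hz, zero_add]
          apply Finset.sum_congr rfl
          intro m hmm
          have hmm' := Finset.mem_Ico.mp hmm
          rw [if_pos (pvOk_mono hmm'.1 (Nat.le_refl _) hec)]
        rw [hsplit, hT]
        congr 1
        push_cast
        ring
      have hnext : pvPS nums k (j+1) = pvPS nums k j + pvT nums k 0 j := by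
        unfold pvPS
        rw [Finset.sum_range_succ]
      rw [bLoop.eq_def, dif_pos hjle]
      simp only [hm1, hm2, ← htdef]
      refine ih (j+1) t.1 t.2.1 t.2.2 _ _ (by omega) (by omega) (by omega)
        (by simpa using heb) (by simpa using hec) (by simpa using hed)
        (by simpa using hee) (by simpa using hef) (by simp [hdl]) (by simp [hpl]) ?_ ?_
      · intro s hs
        simp only [Nat.add_sub_cancel] at hs
        rcases Nat.eq_or_lt_of_le hs with hs' | hs'
        · subst hs'
          rw [List.getD_eq_getElem?_getD, List.getElem?_set_self (by omega),
            Option.getD_some, hval]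
        · rw [List.getD_eq_getElem?_getD, List.getElem?_set_ne (by omega),
            ← List.getD_eq_getElem?_getD]
          exact hdp s (by omega)
      · intro s hs
        rcases Nat.eq_or_lt_of_le hs with hs' | hs'
        · subst hs'
          rw [List.getD_eq_getElem?_getD, List.getElem?_set_self (by omega), Option.getD_some,
            PySem.Int.mod_eq_emod_of_pos (by norm_num), hval, hpre j (Nat.le_refl _),
            ← Int.add_emod, hnext]
          congr 1
          push_cast
          ring
        · rw [List.getD_eq_getElem?_getD, List.getElem?_set_ne (by omega),
            ← List.getD_eq_getElem?_getD]
          exact hpre s (by omega)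
    · rw [bLoop.eq_def, dif_neg hjle]
      exact hdp n (by omega)

theorem B_eq (nums : List Int) (k : Int) :
    countPartitions_alt nums k = (pvT nums k 0 nums.length : Int) % 1000000007 := by
  show ((bLoop nums k nums.length 1 0 [] []
      ((List.replicate (nums.length+1) (0:Int)).set 0 1)
      ((List.replicate (nums.length+2) (0:Int)).set 1 1)).1).getD nums.length 0 = _
  apply bLoop_spec nums k nums.length 1 0 [] [] _ _ (Nat.le_refl _) (by omega) (by omega)
    (pvOk_nil (by omega)) (by intro l hl; omega) rfl rfl (by simp) (by simp)
  · intro t ht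
    have ht' : t = 0 := by omega
    subst ht'
    rw [List.getD_eq_getElem?_getD, List.getElem?_set_self (by simp), Option.getD_some,
      pvT_stop nums k (Nat.le_refl 0)]
    norm_num
  · intro t ht
    interval_cases t
    · rw [List.getD_eq_getElem?_getD, List.getElem?_set_ne (by omega),
        List.getElem?_replicate_of_lt (by omega), Option.getD_some]
      unfold pvPS
      rw [Finset.range_zero, Finset.sum_empty]
      norm_num
    · rw [List.getD_eq_getElem?_getD, List.getElem?_set_self (by simp), Option.getD_some]
      unfold pvPS
      rw [Finset.range_one, Finset.sum_singleton, pvT_stop nums k (Nat.le_refl 0)]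
      norm_num

-- ---- the k < 0 case of A ----
-- the outer loop only ever appends to the accumulator
theorem aOuter_acc (nums : List Int) (k : Int) (n : Nat) :
    ∀ fuel l r m1 m2 rex, n - l ≤ fuel →
    aOuter nums k n l r m1 m2 rex = rex ++ aOuter nums k n l r m1 m2 [] := by
  intro fuel
  induction fuel with
  | zero =>
    intro l r m1 m2 rex hfu
    rw [aOuter.eq_def, dif_neg (by omega), aOuter.eq_def, dif_neg (by omega)]
    simp
  | succ fuel ih =>
    intro l r m1 m2 rex hfu
    by_cases hl : l < n
    · rw [aOuter.eq_def, dif_pos hl]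
      conv_rhs => rw [aOuter.eq_def, dif_pos hl]
      rw [ih (l+1) _ _ _ (rex ++ _) (by omega), ih (l+1) _ _ _ ([] ++ _) (by omega)]
      simp
    · rw [aOuter.eq_def, dif_neg hl, aOuter.eq_def, dif_neg hl]
      simp

theorem aDpLoop_neg (rex : List Nat) (h0 : rex.getD 0 0 = 0) :
    ∀ i dp pre, 1 ≤ i → 0 < dp.length → ((aDpLoop rex i dp pre).1).getD 0 0 = 0 := by
  intro i
  induction i with
  | zero => intro dp pre h1; omega
  | succ i ih =>
    intro dp pre h1 hlen
    cases i with
    | zero =>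
      simp only [aDpLoop, h0]
      rw [sub_self, show PySem.Int.mod 0 1000000007 = 0 from by
        rw [PySem.Int.mod_eq_emod_of_pos (by norm_num)]; rfl]
      rw [List.getD_eq_getElem?_getD, List.getElem?_set_self (by omega)]
      rfl
    | succ i' =>
      simp only [aDpLoop]
      exact ih _ _ (by omega) (by simp [hlen])

theorem A_eq_of_neg (nums : List Int) (k : Int) (hk : k < 0) (hn : 0 < nums.length) :
    countPartitions nums k = 0 := by
  have hstep1 : aWhile nums k nums.length 0 [] [] = (0, [], []) := by
    rw [aWhile.eq_def, dif_pos hn]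
    simp only [aPopMax, aPopMin, List.reverse_nil, List.dropWhile_nil, List.nil_append,
      List.headD_cons, sub_self]
    rw [if_pos (by omega)]
    simp
  have hrex : (aOuter nums k nums.length 0 0 [] [] []).getD 0 0 = 0 := by
    rw [aOuter.eq_def, dif_pos hn]
    simp only [hstep1]
    rw [aOuter_acc nums k nums.length (nums.length) 1 0 _ _ _ (by omega)]
    simp
  show ((aDpLoop (aOuter nums k nums.length 0 0 [] [] []) nums.length
      ((List.replicate (nums.length+1) (0:Int)).set nums.length 1)
      ((List.replicate (nums.length+2) (0:Int)).set nums.length 1)).1).getD 0 0 = 0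
  exact aDpLoop_neg _ hrex nums.length _ _ (by omega) (by simp)

theorem pvT_zero_of_neg (nums : List Int) (k : Int) (hk : k < 0) {n : Nat} (hn : 0 < n) :
    pvT nums k 0 n = 0 := by
  rw [pvT_fwd nums k hn]
  apply Finset.sum_eq_zero
  intro t ht
  have ht' := Finset.mem_Ioc.mp ht
  have : pvOk nums k 0 t = false := by
    by_contra hne
    have hb : pvOk nums k 0 t = true := by
      cases hb : pvOk nums k 0 t with
      | true => rfl
      | false => exact absurd hb hne
    rw [pvOk_iff] at hb
    have := hb 0 0 (by omega) (by omega) (by omega) (by omega)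
    omega
  rw [this]; simp

-- ===== VERDICT (by name: the statement is the Claim_ definition above) =====
theorem countPartitions_spec : Claim_equal_countPartitions := by
  intro nums k _
  unfold Spec_countPartitions
  rcases lt_or_ge k 0 with hk | hk
  · rcases Nat.eq_zero_or_pos nums.length with hn | hn
    · have hnil : nums = [] := List.length_eq_zero_iff.mp hn
      subst hnil
      have hA : countPartitions [] k = 1 := by
        show (aDpLoop (aOuter [] k 0 0 0 [] [] []) 0 ((List.replicate 1 (0:Int)).set 0 1)
          ((List.replicate 2 (0:Int)).set 0 1)).1.getD 0 0 = 1
        rw [aOuter.eq_def]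
        simp [aDpLoop]
      have hB : countPartitions_alt [] k = 1 := by
        show (bLoop [] k 0 1 0 [] [] ((List.replicate 1 (0:Int)).set 0 1)
          ((List.replicate 2 (0:Int)).set 1 1)).1.getD 0 0 = 1
        rw [bLoop.eq_def]
        simp
      rw [hA, hB]
    · rw [A_eq_of_neg nums k hk hn, B_eq nums k, pvT_zero_of_neg nums k hk hn]
      rfl
  · rw [A_eq_of_nonneg nums k hk, B_eq nums k]
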